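-- pv_equiv track=rewrite | github.com/zahidul23/sspred | services/htmlmaker.py | drawCounter
-- ===== SOURCE A (Python) =====
-- def drawCounter(mySeq):
-- 	j=0
-- 	p = 1
-- 	#counterstr = 15*'&nbsp;'
-- 	counterstr = ''
-- 	while j < len(mySeq):
-- 		if j%10 != 0:
-- 			counterstr += ' '
-- 			j = j+1
-- 		else:
-- 			for k in range(len(str(p))):
-- 				counterstr += str(str(p)[k])
-- 				j=j+1
-- 			p = p+10
--
-- 	return counterstr
-- ===== SOURCE B (Python) =====
-- def drawCounter(mySeq):
--     n = len(mySeq)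
--     blocks = []
--     j = 0
--     k = 0
--     while j < n:
--         s = str(1 + 10 * k)
--         end = j + len(s)
--         nxt = min(end + (-end) % 10, max(n, end))
--         blocks.append(s + ' ' * (nxt - end))
--         j = nxt
--         k += 1
--     return ''.join(blocks)
-- ===== Notes on version B (the rewrite author's own statement) =====
-- stated objective: alternative
-- what changed: Replaced A's per-character simulation (a position loop that emits one space per iteration and copies str(p) char by char under a j%10 branch, with quadratic string concatenation) by block construction: the counter value is derived from the block index k as 1+10*k, the next block boundary is computed in closed form with modular arithmetic min(end + (-end)%10, max(n, end)) instead of any space-emitting loop, each block is built as one padded string, and the result is joined once.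
import Mathlib
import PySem

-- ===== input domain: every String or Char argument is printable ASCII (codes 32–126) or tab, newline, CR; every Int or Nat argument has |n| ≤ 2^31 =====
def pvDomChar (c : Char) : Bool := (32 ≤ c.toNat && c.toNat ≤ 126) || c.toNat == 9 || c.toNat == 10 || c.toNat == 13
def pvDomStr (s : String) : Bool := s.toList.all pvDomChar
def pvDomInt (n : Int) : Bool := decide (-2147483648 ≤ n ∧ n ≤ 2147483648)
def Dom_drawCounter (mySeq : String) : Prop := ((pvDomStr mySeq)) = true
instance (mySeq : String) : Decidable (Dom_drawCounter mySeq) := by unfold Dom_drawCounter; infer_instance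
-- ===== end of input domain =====

-- B replaces A's per-character simulation by block construction: the counter comes from the
-- block index (1 + 10*k) and the next block boundary is a closed-form modular-arithmetic
-- expression, so no space-emitting loop remains (objective: alternative decomposition).
-- Both loops carry a fuel argument only to make them total; fuel = len(mySeq) always suffices
-- because every iteration advances the position j by at least 1.

-- ===== PORT A =====
-- A's while loop; acc is counterstr as a char list, j the position, p the counter.
-- One fuel unit per while-iteration (a space, or one whole digit copy).
def drawCounterLoopA (fuel : Nat) (n j p : Int) (acc : List Char) : List Char :=
  match fuel with
  | 0 => acc
  | m + 1 =>
    if j < n then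
      if PySem.Int.mod j 10 ≠ 0 then
        drawCounterLoopA m n (j + 1) p (acc ++ [' '])
      else
        -- 'for k in range(len(str(p))): counterstr += str(p)[k]; j = j+1'
        let st := (PySem.Int.toChars p).foldl
          (fun (st : List Char × Int) c => (st.1 ++ [c], st.2 + 1)) (acc, j)
        drawCounterLoopA m n st.2 (p + 10) st.1
    else acc

def drawCounter (mySeq : String) : String :=
  String.ofList (drawCounterLoopA (PySem.Str.len mySeq).toNat (PySem.Str.len mySeq) 0 1 [])

-- ===== PORT B =====
-- Python's 'min(end + (-end) % 10, max(n, end))' (the next block boundary)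
def pvNext (n e : Int) : Int := min (e + PySem.Int.mod (-e) 10) (max n e)

-- B's loop: one iteration (one fuel unit) per block; block k holds str(1+10*k) followed by
-- 'nxt - end' spaces ("s + ' ' * (nxt - end)", ported exactly as append of a replicate).
def drawCounterLoopB (fuel : Nat) (n j k : Int) (blocks : List (List Char)) : List (List Char) :=
  match fuel with
  | 0 => blocks
  | m + 1 =>
    if j < n then
      let s := PySem.Int.toChars (1 + 10 * k)
      let e := j + (s.length : Int)
      drawCounterLoopB m n (pvNext n e) (k + 1)
        (blocks ++ [s ++ List.replicate (pvNext n e - e).toNat ' '])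
    else blocks

-- ''.join(blocks)
def drawCounter_alt (mySeq : String) : String :=
  String.ofList (drawCounterLoopB (PySem.Str.len mySeq).toNat (PySem.Str.len mySeq) 0 0 []).flatten

-- ===== PRECONDITION & SPEC =====
def Spec_drawCounter (mySeq : String) (out : String) : Prop := out = drawCounter_alt mySeq
instance (mySeq : String) (out : String) : Decidable (Spec_drawCounter mySeq out) := by unfold Spec_drawCounter; infer_instance

-- ===== CLAIM (what is proved, stated in full; the proofs are below) =====
def Claim_equal_drawCounter : Prop := ∀ (mySeq : String), Dom_drawCounter mySeq → Spec_drawCounter mySeq (drawCounter mySeq)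

-- ===== LEMMAS AND PROOFS =====

-- str(p) never yields the empty string
theorem pvToChars_ne_nil (p : Int) : PySem.Int.toChars p ≠ [] := by
  unfold PySem.Int.toChars
  split
  · simp
  · have h10 : 0 < (Nat.toDigits 10 (Int.toNat p)).length := Nat.length_toDigits_pos
    intro h; simp [h] at h10

-- A's inner character-copy loop copies str(p) and advances j by its length.
theorem pvFoldCopy (l : List Char) (a : List Char) (j0 : Int) :
    l.foldl (fun (st : List Char × Int) c => (st.1 ++ [c], st.2 + 1)) (a, j0)
      = (a ++ l, j0 + l.length) := by
  induction l generalizing a j0 with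
  | nil => simp
  | cons c t ih =>
    simp [List.foldl_cons, ih]
    omega

-- pvNext n j never moves backwards.
theorem pvNext_ge (n j : Int) : j ≤ pvNext n j := by
  have hm := PySem.Int.mod_eq_emod_of_pos (a := -j) (b := 10) (by norm_num)
  simp only [pvNext, hm]
  omega

-- pvNext n j stays within n when starting below it.
theorem pvNext_le (n j : Int) (h : j < n) : pvNext n j ≤ n := by
  have hm := PySem.Int.mod_eq_emod_of_pos (a := -j) (b := 10) (by norm_num)
  simp only [pvNext, hm]
  omega

-- pvNext n j is a multiple of 10 or at/past the end.
theorem pvNext_inv (n j : Int) : PySem.Int.mod (pvNext n j) 10 = 0 ∨ ¬ pvNext n j < n := by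
  have hm := PySem.Int.mod_eq_emod_of_pos (a := -j) (b := 10) (by norm_num)
  have hm2 := PySem.Int.mod_eq_emod_of_pos (a := pvNext n j) (b := 10) (by norm_num)
  rw [hm2]
  simp only [pvNext, hm]
  omega

-- A's space run: c = pvNext n j - j spaces are emitted, one fuel unit each, landing on pvNext n j.
theorem pvSpaceRun (c : Nat) (a : Nat) (n j p : Int) (acc : List Char)
    (hc : (pvNext n j - j).toNat = c) :
    drawCounterLoopA (c + a) n j p acc
      = drawCounterLoopA a n (pvNext n j) p (acc ++ List.replicate c ' ') := by
  induction c generalizing j acc with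
  | zero =>
    have heq : pvNext n j = j := by
      have := pvNext_ge n j; omega
    rw [heq]
    simp
  | succ c ih =>
    have hmj := PySem.Int.mod_eq_emod_of_pos (a := -j) (b := 10) (by norm_num)
    have hj10 := PySem.Int.mod_eq_emod_of_pos (a := j) (b := 10) (by norm_num)
    have hgt : j < pvNext n j := by
      have := pvNext_ge n j; omega
    have hbounds : j < n ∧ j % 10 ≠ 0 := by
      by_contra hb
      have heq : pvNext n j = j := by
        simp only [pvNext, hmj]
        omega
      omega
    have hne : PySem.Int.mod j 10 ≠ 0 := by rw [hj10]; exact hbounds.2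
    have hmj1 := PySem.Int.mod_eq_emod_of_pos (a := -(j + 1)) (b := 10) (by norm_num)
    have hsame : pvNext n (j + 1) = pvNext n j := by
      simp only [pvNext, hmj, hmj1]
      omega
    have hstep : drawCounterLoopA (c + 1 + a) n j p acc
        = drawCounterLoopA (c + a) n (j + 1) p (acc ++ [' ']) := by
      rw [show c + 1 + a = (c + a) + 1 by omega]
      simp only [drawCounterLoopA]
      rw [if_pos hbounds.1, if_pos hne]
    rw [hstep, ih (j + 1) (acc ++ [' ']) (by rw [hsame]; omega), hsame]
    congr 1
    rw [List.replicate_succ, List.append_assoc]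
    rfl

-- Main simulation: from a position that is a multiple of 10 (or past the end), with counter
-- 1 + 10*k and enough fuel on both sides, A's loop and B's block loop agree.
theorem pvMainSim (b : Nat) (a : Nat) (n j k : Int) (blocks : List (List Char))
    (ha : (n - j).toNat ≤ a) (hb : (n - j).toNat ≤ b)
    (hj : PySem.Int.mod j 10 = 0 ∨ ¬ j < n) :
    drawCounterLoopA a n j (1 + 10 * k) blocks.flatten
      = (drawCounterLoopB b n j k blocks).flatten := by
  induction b generalizing a j k blocks with
  | zero =>
    have hnj : ¬ j < n := by omega
    cases a with
    | zero => rfl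
    | succ a => simp only [drawCounterLoopA, drawCounterLoopB, if_neg hnj]
  | succ b ih =>
    by_cases hlt : j < n
    · have hmod : PySem.Int.mod j 10 = 0 := by
        rcases hj with h | h
        · exact h
        · exact absurd hlt h
      have hlen : (PySem.Int.toChars (1 + 10 * k)).length ≠ 0 := by
        simp [pvToChars_ne_nil (1 + 10 * k)]
      set s := PySem.Int.toChars (1 + 10 * k) with hs
      set e := j + (s.length : Int) with he
      have hej : j + 1 ≤ e := by omega
      have hnge := pvNext_ge n e
      have hnle : pvNext n e ≤ max n e := by
        have hm := PySem.Int.mod_eq_emod_of_pos (a := -e) (b := 10) (by norm_num)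
        simp only [pvNext, hm]
        omega
      obtain ⟨a₀, rfl⟩ : ∃ a₀, a = a₀ + 1 := by
        cases a with
        | zero => omega
        | succ a₀ => exact ⟨a₀, rfl⟩
      -- unfold A: digit copy consumes one fuel unit
      have hA : drawCounterLoopA (a₀ + 1) n j (1 + 10 * k) blocks.flatten
          = drawCounterLoopA a₀ n e (1 + 10 * k + 10) (blocks.flatten ++ s) := by
        simp only [drawCounterLoopA]
        rw [if_pos hlt, if_neg (not_not_intro hmod), pvFoldCopy]
      -- split A's remaining fuel: c spaces, then the rest
      have hcle : (pvNext n e - e).toNat ≤ a₀ := by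
        by_cases hen : e < n
        · have := pvNext_le n e hen
          omega
        · omega
      obtain ⟨a₁, ha₁⟩ : ∃ a₁, a₀ = (pvNext n e - e).toNat + a₁ :=
        ⟨a₀ - (pvNext n e - e).toNat, by omega⟩
      have hsp := pvSpaceRun (pvNext n e - e).toNat a₁ n e (1 + 10 * k + 10)
        (blocks.flatten ++ s) rfl
      -- unfold B one block
      have hB : drawCounterLoopB (b + 1) n j k blocks
          = drawCounterLoopB b n (pvNext n e) (k + 1)
              (blocks ++ [s ++ List.replicate (pvNext n e - e).toNat ' ']) := by
        simp only [drawCounterLoopB]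
        rw [if_pos hlt]
      rw [hA, ha₁, hsp, hB]
      have hk : 1 + 10 * k + 10 = 1 + 10 * (k + 1) := by ring
      have hacc : blocks.flatten ++ s ++ List.replicate (pvNext n e - e).toNat ' '
          = (blocks ++ [s ++ List.replicate (pvNext n e - e).toNat ' ']).flatten := by
        simp
      rw [hk, hacc]
      exact ih a₁ (pvNext n e) (k + 1) _ (by omega) (by omega) (pvNext_inv n e)
    · cases a with
      | zero =>
        have : ¬ (0:Nat) < (n - j).toNat := by omega
        simp only [drawCounterLoopA, drawCounterLoopB, if_neg hlt]
      | succ a => simp only [drawCounterLoopA, drawCounterLoopB, if_neg hlt]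

-- ===== VERDICT (by name: the statement is the Claim_ definition above) =====
theorem drawCounter_spec : Claim_equal_drawCounter := by
  intro mySeq _
  unfold Spec_drawCounter drawCounter drawCounter_alt
  have h := pvMainSim (PySem.Str.len mySeq).toNat (PySem.Str.len mySeq).toNat
    (PySem.Str.len mySeq) 0 0 [] (by omega) (by omega) (Or.inl (by decide))
  simp only [List.flatten_nil] at h
  rw [show (1 : Int) = 1 + 10 * 0 by ring, h]
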